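-- pv_equiv track=rewrite | github.com/droidfringe/wordle | find_words.py | create_potential_matches
-- ===== SOURCE A (Python) =====
-- def get_common_chars(word1: str, word2: str):
--     chars1 = set(word1);
--     chars2 = set(word2);
--     return len(chars1.intersection(chars2));
--
-- def create_potential_matches(words):
--     num_words = len(words);
--     matches = [set() for _ in range(num_words)];
--     for i in range(num_words - 1):
--         for j in range(i + 1, num_words):
--             num_common_chars = get_common_chars(words[i], words[j]);
--             if (num_common_chars == 0):
--                 matches[i].add(j);
--
--     return matches;
-- ===== SOURCE B (Python) =====
-- def create_potential_matches(words):
--     # Inverted index: char -> set of indices of words containing it; a word's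
--     # candidates are the later indices not blocked by any of its characters.
--     n = len(words)
--     index = {}
--     for i in range(n):
--         for c in set(words[i]):
--             index.setdefault(c, set()).add(i)
--     result = []
--     for i in range(n):
--         blocked = set()
--         for c in set(words[i]):
--             blocked |= index[c]
--         result.append({j for j in range(i + 1, n) if j not in blocked})
--     return result
-- ===== Notes on version B (the rewrite author's own statement) =====
-- stated objective: faster
-- what changed: Replaces the all-pairs set-build-and-intersect test with an inverted index (char -> set of word indices): each word unions the posting lists of its characters into a blocked set once, so the per-pair check is a single hash membership instead of constructing and intersecting two character sets.
import Mathlib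
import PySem

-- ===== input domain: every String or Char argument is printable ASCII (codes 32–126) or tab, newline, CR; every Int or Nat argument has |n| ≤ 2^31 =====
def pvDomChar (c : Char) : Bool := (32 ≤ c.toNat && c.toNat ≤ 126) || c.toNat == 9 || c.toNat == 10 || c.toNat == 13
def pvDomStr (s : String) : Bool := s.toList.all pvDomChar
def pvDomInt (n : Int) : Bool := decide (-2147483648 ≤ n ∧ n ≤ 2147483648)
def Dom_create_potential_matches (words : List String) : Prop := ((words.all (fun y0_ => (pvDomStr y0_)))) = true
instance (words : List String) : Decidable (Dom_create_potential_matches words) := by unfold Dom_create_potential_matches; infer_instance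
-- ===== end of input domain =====

-- B replaces A's all-pairs set-intersection test by an inverted index from character
-- to the set of word indices containing it; each word unions its characters' posting
-- lists into a blocked set and keeps the later indices outside it (objective: faster).

-- ===== PORT A =====
def get_common_chars (word1 word2 : String) : Int :=
  let chars1 := PySem.Set.ofList word1.toList
  let chars2 := PySem.Set.ofList word2.toList
  (PySem.Set.len (PySem.Set.inter chars1 chars2) : Int)

def create_potential_matches (words : List String) : List (List Int) :=
  let num_words : Int := words.length
  let ms : List (PySem.Set Int) :=
    (PySem.List.pyRange 0 num_words 1).map (fun _ => PySem.Set.empty)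
  (PySem.List.pyRange 0 (num_words - 1) 1).foldl (fun ms i =>
    (PySem.List.pyRange (i + 1) num_words 1).foldl (fun ms j =>
      let num_common_chars :=
        get_common_chars (PySem.List.pyGetD words i "") (PySem.List.pyGetD words j "")
      if num_common_chars == 0 then
        PySem.List.pySetD ms i (PySem.Set.add (PySem.List.pyGetD ms i []) j)
      else ms) ms) ms

-- ===== PORT B =====
def create_potential_matches_alt (words : List String) : List (List Int) :=
  let n : Int := words.length
  -- index.setdefault(c, set()).add(i)  ≡  d[c] = (d.get(c, set())).add(i)  =  Dict.modify
  let index : PySem.Dict Char (PySem.Set Int) :=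
    (PySem.List.pyRange 0 n 1).foldl (fun d i =>
      (PySem.Set.ofList (PySem.List.pyGetD words i "").toList).foldl
        (fun d c => d.modify c [] (fun s => PySem.Set.add s i)) d) PySem.Dict.empty
  (PySem.List.pyRange 0 n 1).foldl (fun result i =>
    let blocked : PySem.Set Int :=
      (PySem.Set.ofList (PySem.List.pyGetD words i "").toList).foldl
        (fun s c => PySem.Set.union s (index.getD c [])) PySem.Set.empty
    result ++ [PySem.Set.ofList ((PySem.List.pyRange (i + 1) n 1).filter
      (fun j => !(PySem.Set.contains blocked j)))]) []

-- ===== PRECONDITION & SPEC =====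
def Spec_create_potential_matches (words : List String) (out : List (List Int)) : Prop := out = create_potential_matches_alt words
instance (words : List String) (out : List (List Int)) : Decidable (Spec_create_potential_matches words out) := by unfold Spec_create_potential_matches; infer_instance

-- ===== CLAIM (what is proved, stated in full; the proofs are below) =====
def Claim_equal_create_potential_matches : Prop := ∀ (words : List String), Dom_create_potential_matches words → Spec_create_potential_matches words (create_potential_matches words)

-- ===== LEMMAS AND PROOFS =====

-- proof-only abbreviations for B's two folds (same terms as in the port)
def pvIndex (words : List String) : PySem.Dict Char (PySem.Set Int) :=
  (PySem.List.pyRange 0 (words.length : Int) 1).foldl (fun d i =>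
    (PySem.Set.ofList (PySem.List.pyGetD words i "").toList).foldl
      (fun d c => d.modify c [] (fun s => PySem.Set.add s i)) d) PySem.Dict.empty

def pvBlocked (words : List String) (i : Int) : PySem.Set Int :=
  (PySem.Set.ofList (PySem.List.pyGetD words i "").toList).foldl
    (fun s c => PySem.Set.union s ((pvIndex words).getD c [])) PySem.Set.empty

theorem pv_getD_set_self (l : List (List Int)) (k : Nat) (v : List Int) (h : k < l.length) :
    (l.set k v).getD k [] = v := by
  rw [List.getD_eq_getElem _ _ (by simpa using h)]
  simp

-- A's inner loop only edits slot k: it equals one functional update of that slot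
theorem pv_inner_fold (q' : Int → Bool) (k : Nat) (L : List Int) :
    ∀ (ms : List (List Int)), k < ms.length →
    L.foldl (fun ms j => if q' j then
        PySem.List.pySetD ms (↑k) (PySem.Set.add (PySem.List.pyGetD ms (↑k) []) j)
      else ms) ms
    = ms.set k ((L.filter q').foldl PySem.Set.add (ms.getD k [])) := by
  induction L with
  | nil =>
    intro ms h
    simp only [List.foldl_nil, List.filter_nil]
    rw [List.getD_eq_getElem _ _ h, List.set_getElem_self]
  | cons j L ih =>
    intro ms h
    rw [List.foldl_cons, List.filter_cons]
    cases hq : q' j with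
    | false => simpa [hq] using ih ms h
    | true =>
      rw [if_pos rfl, if_pos rfl, PySem.List.pySetD_natCast, PySem.List.pyGetD_natCast,
        ih _ (by simpa using h), List.set_set, List.foldl_cons,
        pv_getD_set_self _ _ _ h]

-- A's outer loop fills the slots left to right: after m steps the prefix is the mapped form
theorem pv_outer_fold (q : Int → Int → Bool) (n m : Nat) (hm : m ≤ n) :
    (PySem.List.pyRange 0 (↑m) 1).foldl
      (fun ms i => (PySem.List.pyRange (i + 1) (↑n) 1).foldl
        (fun ms j => if q i j then
            PySem.List.pySetD ms i (PySem.Set.add (PySem.List.pyGetD ms i []) j)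
          else ms) ms)
      (List.replicate n ([] : List Int))
    = (PySem.List.pyRange 0 (↑m) 1).map (fun i =>
        PySem.Set.ofList ((PySem.List.pyRange (i + 1) (↑n) 1).filter (q i)))
      ++ List.replicate (n - m) ([] : List Int) := by
  induction m with
  | zero =>
    rw [PySem.List.pyRange_one]
    simp
  | succ m ih =>
    have hm' : m < n := hm
    have h0 : (0 : Int) ≤ ↑m := by positivity
    rw [show ((m + 1 : Nat) : Int) = (m : Int) + 1 by push_cast; ring,
      PySem.List.pyRange_one_succ_right h0, List.foldl_append, ih (le_of_lt hm'),
      List.foldl_cons, List.foldl_nil, List.map_append]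
    have hlen : m < ((PySem.List.pyRange 0 (↑m) 1).map (fun i =>
        PySem.Set.ofList ((PySem.List.pyRange (i + 1) (↑n) 1).filter (q i)))
        ++ List.replicate (n - m) ([] : List Int)).length := by
      simp [PySem.List.length_pyRange_one]; omega
    rw [pv_inner_fold (q ↑m) m _ _ hlen]
    have hgetD : ((PySem.List.pyRange 0 (↑m) 1).map (fun i =>
        PySem.Set.ofList ((PySem.List.pyRange (i + 1) (↑n) 1).filter (q i)))
        ++ List.replicate (n - m) ([] : List Int)).getD m [] = [] := by
      rw [List.getD_eq_getElem _ _ hlen,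
        List.getElem_append_right (by simp [PySem.List.length_pyRange_one])]
      simp
    rw [hgetD, ← PySem.Set.ofList_eq_foldl]
    have hrep : List.replicate (n - m) ([] : List Int)
        = [] :: List.replicate (n - (m + 1)) ([] : List Int) := by
      rw [show n - m = (n - (m+1)) + 1 by omega, List.replicate_succ]
    rw [List.set_append, if_neg (by simp [PySem.List.length_pyRange_one]), hrep]
    simp [PySem.List.length_pyRange_one]

theorem pv_init_eq (n : Nat) :
    (PySem.List.pyRange 0 (↑n) 1).map (fun _ => (PySem.Set.empty : PySem.Set Int))
      = List.replicate n ([] : List Int) := by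
  rw [PySem.List.pyRange_one, List.map_map]
  simp [Function.comp_def, PySem.Set.empty, List.map_const']

-- A in canonical form: one row of filtered later indices per word
theorem pv_A_eq (words : List String) :
    create_potential_matches words
    = (PySem.List.pyRange 0 (words.length : Int) 1).map (fun i =>
        PySem.Set.ofList ((PySem.List.pyRange (i + 1) (words.length : Int) 1).filter (fun j =>
          get_common_chars (PySem.List.pyGetD words i "") (PySem.List.pyGetD words j "") == 0))) := by
  unfold create_potential_matches
  dsimp only
  cases hn : words.length with
  | zero =>
    have he : words = [] := List.length_eq_zero_iff.mp hn
    subst he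
    decide
  | succ p =>
    rw [pv_init_eq (p + 1),
      show ((p + 1 : Nat) : Int) - 1 = ((p : Nat) : Int) by push_cast; ring,
      pv_outer_fold (fun i j =>
        get_common_chars (PySem.List.pyGetD words i "") (PySem.List.pyGetD words j "") == 0)
        (p + 1) p (by omega),
      show ((p + 1 : Nat) : Int) = ((p : Nat) : Int) + 1 by push_cast; ring,
      PySem.List.pyRange_one_succ_right (by positivity), List.map_append]
    congr 1
    rw [show p + 1 - p = 1 by omega]
    simp [PySem.List.pyRange_one_eq_nil, PySem.Set.ofList]

-- B in canonical form
theorem pv_B_eq (words : List String) :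
    create_potential_matches_alt words
    = (PySem.List.pyRange 0 (words.length : Int) 1).map (fun i =>
        PySem.Set.ofList ((PySem.List.pyRange (i + 1) (words.length : Int) 1).filter (fun j =>
          !(PySem.Set.contains (pvBlocked words i) j)))) := by
  unfold create_potential_matches_alt pvBlocked pvIndex
  dsimp only
  rw [PySem.List.foldl_append_singleton_eq_map]
  exact List.nil_append _

-- A's pair test says exactly "no common character"
theorem pv_gcc_zero (w1 w2 : String) :
    (get_common_chars w1 w2 == 0) = true ↔ ¬ ∃ c, c ∈ w1.toList ∧ c ∈ w2.toList := by
  unfold get_common_chars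
  simp only [PySem.Set.len, beq_iff_eq, Nat.cast_eq_zero, List.length_eq_zero_iff,
    List.eq_nil_iff_forall_not_mem, PySem.Set.mem_inter, PySem.Set.mem_ofList, not_exists,
    not_and]

-- membership in the union-of-posting-lists fold
theorem pv_mem_union_fold (g : Char → List Int) (cs : List Char) (s : PySem.Set Int) (j : Int) :
    j ∈ cs.foldl (fun s c => PySem.Set.union s (g c)) s ↔ j ∈ s ∨ ∃ c ∈ cs, j ∈ g c := by
  induction cs generalizing s with
  | nil => simp
  | cons c cs ih =>
    rw [List.foldl_cons, ih]
    simp only [PySem.Set.mem_union, List.mem_cons]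
    constructor
    · rintro (⟨h | h⟩ | ⟨c', hc', hj⟩)
      · exact Or.inl h
      · exact Or.inr ⟨c, Or.inl rfl, h⟩
      · exact Or.inr ⟨c', Or.inr hc', hj⟩
    · rintro (h | ⟨c', hc' | hc', hj⟩)
      · exact Or.inl (Or.inl h)
      · exact Or.inl (Or.inr (hc' ▸ hj))
      · exact Or.inr ⟨c', hc', hj⟩

-- indexing ONE word: membership of the posting list after its characters are folded in
theorem pv_word_fold (cs : List Char) (i : Int) (d : PySem.Dict Char (PySem.Set Int))
    (c : Char) (j : Int) :
    j ∈ (cs.foldl (fun d c' => d.modify c' [] (fun s => PySem.Set.add s i)) d).getD c []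
      ↔ j ∈ d.getD c [] ∨ (c ∈ cs ∧ j = i) := by
  induction cs generalizing d with
  | nil => simp
  | cons c' cs ih =>
    rw [List.foldl_cons, ih, PySem.Dict.getD_modify]
    by_cases hc : c = c'
    · subst hc
      rw [if_pos rfl]
      simp only [PySem.Set.mem_add, List.mem_cons]
      tauto
    · rw [if_neg hc]
      simp only [List.mem_cons]
      have hcc : ¬ c = c' := hc
      tauto

-- the whole inverted index: j is in c's posting list iff some folded word j has c
theorem pv_index_fold (words : List String) (L : List Int)
    (d : PySem.Dict Char (PySem.Set Int)) (c : Char) (j : Int) :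
    j ∈ (L.foldl (fun d i =>
        (PySem.Set.ofList (PySem.List.pyGetD words i "").toList).foldl
          (fun d c' => d.modify c' [] (fun s => PySem.Set.add s i)) d) d).getD c []
      ↔ j ∈ d.getD c [] ∨ ∃ i ∈ L, c ∈ (PySem.List.pyGetD words i "").toList ∧ j = i := by
  induction L generalizing d with
  | nil => simp
  | cons i L ih =>
    rw [List.foldl_cons, ih, pv_word_fold]
    simp only [PySem.Set.mem_ofList, List.mem_cons]
    constructor
    · rintro (⟨h | ⟨hc, hj⟩⟩ | ⟨i', hi', hc', hj'⟩)
      · exact Or.inl h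
      · exact Or.inr ⟨i, Or.inl rfl, hc, hj⟩
      · exact Or.inr ⟨i', Or.inr hi', hc', hj'⟩
    · rintro (h | ⟨i', hi' | hi', hc', hj'⟩)
      · exact Or.inl (Or.inl h)
      · exact Or.inl (Or.inr ⟨hi' ▸ hc', hi' ▸ hj'⟩)
      · exact Or.inr ⟨i', hi', hc', hj'⟩

-- the per-pair predicates of the two canonical forms agree on every admissible (i, j)
theorem pv_pred_eq (words : List String) (i j : Int)
    (hi : 0 ≤ i) (hij : i < j) (hj : j < (words.length : Int)) :
    (get_common_chars (PySem.List.pyGetD words i "") (PySem.List.pyGetD words j "") == 0)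
    = !(PySem.Set.contains (pvBlocked words i) j) := by
  rw [Bool.eq_iff_iff, pv_gcc_zero, Bool.not_eq_eq_eq_not, Bool.not_true,
    ← Bool.not_eq_true, PySem.Set.contains_iff]
  apply not_congr
  unfold pvBlocked
  rw [pv_mem_union_fold]
  simp only [PySem.Set.mem_ofList, PySem.Set.empty, List.not_mem_nil, false_or]
  unfold pvIndex
  constructor
  · rintro ⟨c, h1, h2⟩
    refine ⟨c, h1, ?_⟩
    rw [pv_index_fold]
    exact Or.inr ⟨j, PySem.List.mem_pyRange_one.mpr ⟨by omega, hj⟩, h2, rfl⟩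
  · rintro ⟨c, h1, h2⟩
    rw [pv_index_fold] at h2
    rcases h2 with h2 | ⟨i', _, hc', hj'⟩
    · simp [PySem.Dict.getD_empty] at h2
    · exact ⟨c, h1, hj' ▸ hc'⟩

-- ===== VERDICT (by name: the statement is the Claim_ definition above) =====
theorem create_potential_matches_spec : Claim_equal_create_potential_matches := by
  intro words _
  unfold Spec_create_potential_matches
  rw [pv_A_eq, pv_B_eq]
  apply List.map_congr_left
  intro i hi
  rcases PySem.List.mem_pyRange_one.mp hi with ⟨hi0, _⟩
  congr 1
  apply List.filter_congr
  intro j hj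
  rcases PySem.List.mem_pyRange_one.mp hj with ⟨hj1, hjn⟩
  exact pv_pred_eq words i j hi0 (by omega) hjn
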